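-- pv_equiv track=rewrite | github.com/event/we-bridge | bridge.py | doubled_undertricks_to_result
-- ===== SOURCE A (Python) =====
-- def doubled_undertricks_to_result(undertricks, vuln) :
--     vadd = 100 if vuln else 0
--     v = 300
--     res = 0
--     while undertricks > 3 :
--         res += v
--         undertricks -= 1
--     v -= 100 - vadd
--     while undertricks > 1 :
--         res += v
--         undertricks -= 1
--     return (res + v - 100)
-- ===== SOURCE B (Python) =====
-- def doubled_undertricks_to_result(undertricks, vuln):
--     vadd = 100 if vuln else 0
--     return (300 * max(undertricks - 3, 0)
--             + (200 + vadd) * max(min(undertricks, 3) - 1, 0)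
--             + 100 + vadd)
-- ===== Notes on version B (the rewrite author's own statement) =====
-- stated objective: faster
-- what changed: Replaced the two undertrick-counting while-loops by a closed-form arithmetic formula (iteration counts via max/min times the per-trick penalties).
import Mathlib
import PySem

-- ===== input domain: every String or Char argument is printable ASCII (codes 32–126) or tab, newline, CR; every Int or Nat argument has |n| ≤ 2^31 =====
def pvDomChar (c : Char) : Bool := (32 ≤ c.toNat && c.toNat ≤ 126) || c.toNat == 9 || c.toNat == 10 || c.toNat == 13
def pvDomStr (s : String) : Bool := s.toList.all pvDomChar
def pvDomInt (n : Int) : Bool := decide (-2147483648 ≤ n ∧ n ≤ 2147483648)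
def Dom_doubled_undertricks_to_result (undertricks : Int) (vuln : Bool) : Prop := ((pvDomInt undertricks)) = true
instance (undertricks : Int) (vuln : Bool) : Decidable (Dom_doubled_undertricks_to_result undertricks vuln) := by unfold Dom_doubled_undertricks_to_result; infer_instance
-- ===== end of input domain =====

-- B replaces A's two counting while-loops by a closed-form O(1) arithmetic formula (faster: asymptotic).


-- ===== PORT A =====
-- first while-loop: while undertricks > 3: res += v; undertricks -= 1   (v = 300 here)
def duLoop1 (undertricks res : Int) : Int × Int :=
  if undertricks > 3 then duLoop1 (undertricks - 1) (res + 300) else (undertricks, res)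
  termination_by (undertricks - 3).toNat
  decreasing_by omega

-- second while-loop: while undertricks > 1: res += v; undertricks -= 1
def duLoop2 (v undertricks res : Int) : Int × Int :=
  if undertricks > 1 then duLoop2 v (undertricks - 1) (res + v) else (undertricks, res)
  termination_by (undertricks - 1).toNat
  decreasing_by omega

def doubled_undertricks_to_result (undertricks : Int) (vuln : Bool) : Int :=
  let vadd : Int := if vuln then 100 else 0
  let p1 := duLoop1 undertricks 0
  let v : Int := 300 - (100 - vadd)
  let p2 := duLoop2 v p1.1 p1.2
  p2.2 + v - 100

-- ===== PORT B =====
def doubled_undertricks_to_result_alt (undertricks : Int) (vuln : Bool) : Int :=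
  let vadd : Int := if vuln then 100 else 0
  300 * max (undertricks - 3) 0 + (200 + vadd) * max (min undertricks 3 - 1) 0 + 100 + vadd

-- ===== PRECONDITION & SPEC =====
def Spec_doubled_undertricks_to_result (undertricks : Int) (vuln : Bool) (out : Int) : Prop := out = doubled_undertricks_to_result_alt undertricks vuln
instance (undertricks : Int) (vuln : Bool) (out : Int) : Decidable (Spec_doubled_undertricks_to_result undertricks vuln out) := by unfold Spec_doubled_undertricks_to_result; infer_instance

-- ===== CLAIM (what is proved, stated in full; the proofs are below) =====
def Claim_equal_doubled_undertricks_to_result : Prop := ∀ (undertricks : Int) (vuln : Bool), Dom_doubled_undertricks_to_result undertricks vuln → Spec_doubled_undertricks_to_result undertricks vuln (doubled_undertricks_to_result undertricks vuln)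

-- ===== LEMMAS AND PROOFS =====
theorem duLoop1_eq (undertricks res : Int) :
    duLoop1 undertricks res = (min undertricks 3, res + 300 * max (undertricks - 3) 0) := by
  fun_induction duLoop1 undertricks res with
  | case1 u r h ih =>
      rw [ih, Prod.mk.injEq]
      have h1 : max (u - 1 - 3) 0 = max (u - 3) 0 - 1 := by omega
      exact ⟨by omega, by rw [h1]; ring⟩
  | case2 u r h =>
      rw [Prod.mk.injEq]
      have h1 : max (u - 3) 0 = 0 := by omega
      exact ⟨by omega, by rw [h1]; ring⟩

theorem duLoop2_eq (v undertricks res : Int) :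
    duLoop2 v undertricks res = (min undertricks 1, res + v * max (undertricks - 1) 0) := by
  fun_induction duLoop2 v undertricks res with
  | case1 u r h ih =>
      rw [ih, Prod.mk.injEq]
      have h1 : max (u - 1 - 1) 0 = max (u - 1) 0 - 1 := by omega
      exact ⟨by omega, by rw [h1]; ring⟩
  | case2 u r h =>
      rw [Prod.mk.injEq]
      have h1 : max (u - 1) 0 = 0 := by omega
      exact ⟨by omega, by rw [h1]; ring⟩

-- ===== VERDICT (by name: the statement is the Claim_ definition above) =====
theorem doubled_undertricks_to_result_spec : Claim_equal_doubled_undertricks_to_result := by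
  intro u vuln _
  unfold Spec_doubled_undertricks_to_result doubled_undertricks_to_result doubled_undertricks_to_result_alt
  simp only [duLoop1_eq, duLoop2_eq]
  cases vuln <;> simp <;> ring_nf
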